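-- pv_equiv track=rewrite | github.com/hunter-teacher-cert/csci70700-spring-2023-herrkm | encryption_non_pke/transpose.py | key_order
-- ===== SOURCE A (Python) =====
-- def key_order(kwd: str):
--     kwd = kwd.upper()
--     sorted = list(kwd)
--     sorted.sort()
--     indices = []
--     for char in sorted:
--         indices.append(kwd.index(char))
--     return indices
-- ===== SOURCE B (Python) =====
-- def key_order(kwd: str):
--     kwd = kwd.upper()
--     first = {}
--     count = {}
--     for i, ch in enumerate(kwd):
--         if ch not in first:
--             first[ch] = i
--         count[ch] = count.get(ch, 0) + 1
--     indices = []
--     for ch in sorted(first):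
--         indices.extend([first[ch]] * count[ch])
--     return indices
-- ===== Notes on version B (the rewrite author's own statement) =====
-- stated objective: faster
-- what changed: Instead of calling str.index for every character of the sorted keyword (a scan per output element), B makes one pass over enumerate(kwd) to build a first-index dict and a count dict, then emits one block [first[ch]]*count[ch] per sorted distinct character.
import Mathlib
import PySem

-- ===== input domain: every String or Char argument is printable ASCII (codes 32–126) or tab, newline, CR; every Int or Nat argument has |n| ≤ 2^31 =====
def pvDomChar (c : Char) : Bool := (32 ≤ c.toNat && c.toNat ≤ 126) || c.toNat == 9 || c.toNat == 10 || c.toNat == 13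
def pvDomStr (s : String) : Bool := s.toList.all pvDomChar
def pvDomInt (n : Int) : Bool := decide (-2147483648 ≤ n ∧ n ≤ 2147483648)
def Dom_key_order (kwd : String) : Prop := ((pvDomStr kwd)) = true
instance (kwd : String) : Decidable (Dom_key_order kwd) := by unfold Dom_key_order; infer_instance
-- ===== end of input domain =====

-- B replaces A's per-character str.index scan with one pass building first-index and count
-- dicts, then emits one block per sorted distinct character (objective: faster).

-- ===== PORT A =====
-- kwd.index(char): char always occurs in kwd here, so str.index never raises and
-- returns the same first-occurrence index as str.find (PySem.Chars.find).
def key_order (kwd : String) : List Int :=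
  let k := PySem.Str.upper kwd
  let sortedL := PySem.List.sorted k.toList (fun c => c) false
  sortedL.foldl (fun indices ch => indices ++ [PySem.Chars.find k.toList [ch]]) []

-- ===== PORT B =====
-- [first[ch]] * count[ch]: count is a positive Python int, ported via .toNat for List.replicate.
def key_order_alt (kwd : String) : List Int :=
  let k := PySem.Str.upper kwd
  let st := (PySem.List.enumerate k.toList 0).foldl
      (fun (st : PySem.Dict Char Int × PySem.Dict Char Int) p =>
        (if st.1.contains p.2 then st.1 else st.1.insert p.2 p.1,
         st.2.insert p.2 (st.2.getD p.2 0 + 1)))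
      (PySem.Dict.empty, PySem.Dict.empty)
  (PySem.List.sorted st.1.keys (fun c => c) false).foldl
    (fun indices ch => indices ++ List.replicate (st.2.getD ch 0).toNat (st.1.getD ch 0)) []

-- ===== PRECONDITION & SPEC =====
def Spec_key_order (kwd : String) (out : List Int) : Prop := out = key_order_alt kwd
instance (kwd : String) (out : List Int) : Decidable (Spec_key_order kwd out) := by unfold Spec_key_order; infer_instance

-- ===== CLAIM (what is proved, stated in full; the proofs are below) =====
def Claim_equal_key_order : Prop := ∀ (kwd : String), Dom_key_order kwd → Spec_key_order kwd (key_order kwd)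

-- ===== LEMMAS AND PROOFS =====

lemma singleton_prefix_iff (t : List Char) (c : Char) : [c] <+: t ↔ t.head? = some c := by
  constructor
  · rintro ⟨r, rfl⟩; rfl
  · intro h; cases t with
    | nil => simp at h
    | cons x xs => simp at h; subst h; exact ⟨xs, rfl⟩

-- str.find of a single character that occurs in the list is its first index (List.index?)
lemma find_singleton_of_index? (l : List Char) (c : Char) (k : Nat)
    (h : PySem.List.index? l c = some k) : PySem.Chars.find l [c] = (k : Int) := by
  obtain ⟨hk, hck, hmin⟩ := PySem.List.getElem_of_index?_eq_some h
  have hinf : [c] <:+: l := ⟨l.take k, l.drop (k+1), by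
    rw [List.append_assoc, List.singleton_append, ← hck, List.getElem_cons_drop hk,
      List.take_append_drop]⟩
  have hnn : 0 ≤ PySem.Chars.find l [c] := (PySem.Chars.find_nonneg_iff l [c]).mpr hinf
  obtain ⟨hpre, hminf⟩ := PySem.Chars.find_spec hnn
  have hjiff : ∀ j, [c] <+: l.drop j ↔ l[j]? = some c := by
    intro j; rw [singleton_prefix_iff, List.head?_drop]
  have hmk : (PySem.Chars.find l [c]).toNat = k := by
    set m := (PySem.Chars.find l [c]).toNat with hm
    rcases lt_trichotomy m k with hlt | he | hgt
    · have := (hjiff m).mp hpre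
      rw [List.getElem?_eq_getElem (Nat.lt_trans hlt hk)] at this
      exact absurd (Option.some.inj this) (hmin m hlt)
    · exact he
    · exact absurd ((hjiff k).mpr (by rw [List.getElem?_eq_getElem hk, hck])) (hminf k hgt)
  omega

-- the first-dict loop: lookup is the first index, offset by the enumeration start
lemma get?_firstFold (l : List Char) : ∀ (s : Int) (d : PySem.Dict Char Int) (ch : Char),
    ((PySem.List.enumerate l s).foldl
        (fun d (p : Int × Char) => if d.contains p.2 then d else d.insert p.2 p.1) d).get? ch
      = ((d.get? ch).or ((PySem.List.index? l ch).map (fun k => s + (k : Int)))) := by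
  induction l with
  | nil => intro s d ch; simp [PySem.List.enumerate_nil, PySem.List.index?]
  | cons c l ih =>
    intro s d ch
    rw [PySem.List.enumerate_cons, List.foldl_cons, ih]
    by_cases hc : ch = c
    · subst hc
      by_cases hd : d.contains ch
      · rw [if_pos hd]
        have hsome : (d.get? ch).isSome := by rw [← PySem.Dict.contains_eq_isSome_get?]; exact hd
        cases hget : d.get? ch with
        | none => rw [hget] at hsome; simp at hsome
        | some v => simp

      · have h1 : d.get? ch = none := by
          rw [PySem.Dict.contains_eq_isSome_get?] at hd
          exact Option.not_isSome_iff_eq_none.mp (by simpa using hd)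
        rw [if_neg hd, PySem.Dict.get?_insert_self, PySem.List.index?_cons_self, h1]
        simp
    · have hstep : (if d.contains c then d else d.insert c s).get? ch = d.get? ch := by
        split
        · rfl
        · exact PySem.Dict.get?_insert_of_ne _ _ hc
      rw [hstep, PySem.List.index?_cons_of_ne l (fun he => hc he.symm)]
      cases hix : PySem.List.index? l ch with
      | none => simp
      | some k =>
        have : s + 1 + (k : Int) = s + ((k : Int) + 1) := by ring
        simp [this]

-- the first-dict loop: keys are the distinct characters in first-occurrence order
lemma keys_firstFold (l : List Char) : ∀ (s : Int) (d : PySem.Dict Char Int),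
    ((PySem.List.enumerate l s).foldl
        (fun d (p : Int × Char) => if d.contains p.2 then d else d.insert p.2 p.1) d).keys
      = PySem.Set.update d.keys l := by
  induction l with
  | nil => intro s d; simp [PySem.List.enumerate_nil, PySem.Set.update]
  | cons c l ih =>
    intro s d
    rw [PySem.List.enumerate_cons, List.foldl_cons, ih, PySem.Set.update_cons]
    congr 1
    by_cases hd : d.contains c
    · rw [if_pos hd]
      exact (PySem.Set.add_of_mem ((PySem.Dict.contains_iff_mem_keys d c).mp hd)).symm
    · rw [if_neg hd, PySem.Dict.keys_insert_of_not_contains d s (by simpa using hd)]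
      exact (PySem.Set.add_of_not_mem (fun hm => hd ((PySem.Dict.contains_iff_mem_keys d c).mpr hm))).symm

-- grouping: a nodup cover of l's elements, flat-mapped to count-many copies, is a permutation of l
lemma perm_flatMap_replicate_count : ∀ (u l : List Char), u.Nodup → (∀ x ∈ l, x ∈ u) →
    (u.flatMap (fun c => List.replicate (l.count c) c)).Perm l := by
  intro u
  induction u with
  | nil =>
    intro l _ h
    have : l = [] := List.eq_nil_iff_forall_not_mem.mpr (fun x hx => absurd (h x hx) (List.not_mem_nil))
    simp [this]
  | cons c u ih =>
    intro l hnd hcov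
    have hcnot : c ∉ u := (List.nodup_cons.mp hnd).1
    have hndu : u.Nodup := (List.nodup_cons.mp hnd).2
    set l' := l.filter (fun x => !(x == c)) with hl'
    have hcong : u.flatMap (fun d => List.replicate (l.count d) d)
        = u.flatMap (fun d => List.replicate (l'.count d) d) := by
      apply List.flatMap_congr
      intro d hd
      have hdc : d ≠ c := fun he => hcnot (he ▸ hd)
      rw [List.count_filter (by simp [hdc])]
    have hperm' : (u.flatMap (fun d => List.replicate (l'.count d) d)).Perm l' := by
      apply ih l' hndu
      intro x hx
      have hxc : x ≠ c := by have := List.of_mem_filter hx; simpa using this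
      rcases List.mem_cons.mp (hcov x (List.mem_of_mem_filter hx)) with h1 | h2
      · exact absurd h1 hxc
      · exact h2
    have e1 : (c :: u).flatMap (fun d => List.replicate (l.count d) d)
        = l.filter (fun x => x == c) ++ u.flatMap (fun d => List.replicate (l'.count d) d) := by
      rw [List.flatMap_cons, List.filter_beq, hcong]
    rw [e1]
    exact (hperm'.append_left _).trans (List.filter_append_perm _ l)

-- a sorted list is the concatenation of its sorted distinct characters' blocks
lemma sorted_eq_flatMap (l : List Char) :
    PySem.List.sorted l (fun c => c) false
      = (PySem.List.sorted (PySem.Set.ofList l) (fun c => c) false).flatMap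
          (fun c => List.replicate (l.count c) c) := by
  set u := PySem.List.sorted (PySem.Set.ofList l) (fun c => c) false with hu
  have hlt : u.Pairwise (· < ·) := PySem.List.sorted_ofList_pairwise_lt l
  have hnd : u.Nodup := hlt.nodup
  have hcov : ∀ x ∈ l, x ∈ u := by
    intro x hx
    rw [hu, PySem.List.mem_sorted, PySem.Set.mem_ofList]; exact hx
  have hp := perm_flatMap_replicate_count u l hnd hcov
  have hle : (u.flatMap (fun c => List.replicate (l.count c) c)).Pairwise (fun a b : Char => a ≤ b) := by
    rw [List.pairwise_flatMap]
    constructor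
    · intro a _; exact List.pairwise_replicate.mpr (Or.inr le_rfl)
    · apply hlt.imp_of_mem
      intro a b _ _ hab x hx y hy
      rw [List.eq_of_mem_replicate hx, List.eq_of_mem_replicate hy]
      exact le_of_lt hab
  exact PySem.List.sorted_id_eq_of_perm_of_pairwise l _ hp hle

-- ===== VERDICT (by name: the statement is the Claim_ definition above) =====
set_option maxHeartbeats 1000000 in
theorem key_order_spec : Claim_equal_key_order := by
  intro kwd _
  unfold Spec_key_order key_order key_order_alt
  dsimp only
  set l := (PySem.Str.upper kwd).toList with hl
  set F := (PySem.List.enumerate l 0).foldl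
      (fun d (p : Int × Char) => if d.contains p.2 then d else d.insert p.2 p.1)
      PySem.Dict.empty with hF
  set C := (PySem.List.enumerate l 0).foldl
      (fun (d : PySem.Dict Char Int) (p : Int × Char) => d.insert p.2 (d.getD p.2 0 + 1))
      PySem.Dict.empty with hC
  -- split B's pair loop into the first-index loop and the count loop
  have hsplit : (PySem.List.enumerate l 0).foldl
      (fun (st : PySem.Dict Char Int × PySem.Dict Char Int) p =>
        (if st.1.contains p.2 then st.1 else st.1.insert p.2 p.1,
         st.2.insert p.2 (st.2.getD p.2 0 + 1)))
      (PySem.Dict.empty, PySem.Dict.empty) = (F, C) := by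
    rw [hF, hC]
    exact PySem.List.foldl_prod_mk
      (fun (d : PySem.Dict Char Int) (p : Int × Char) => if d.contains p.2 then d else d.insert p.2 p.1)
      (fun (d : PySem.Dict Char Int) (p : Int × Char) => d.insert p.2 (d.getD p.2 0 + 1))
      (PySem.List.enumerate l 0) PySem.Dict.empty PySem.Dict.empty
  rw [hsplit]
  -- the count dict counts occurrences
  have hCcount : ∀ ch, C.getD ch 0 = (l.count ch : Int) := by
    intro ch
    have e0 := List.foldl_map (f := fun p : Int × Char => p.2)
      (g := fun (d : PySem.Dict Char Int) c => d.insert c (d.getD c 0 + 1))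
      (l := PySem.List.enumerate l 0) (init := PySem.Dict.empty)
    rw [PySem.List.map_snd_enumerate] at e0
    have e : C = l.foldl (fun (d : PySem.Dict Char Int) c => d.insert c (d.getD c 0 + 1)) PySem.Dict.empty := by
      rw [hC, ← e0]
    rw [e, PySem.Dict.getD_foldl_insert_add_one, PySem.Dict.getD_empty]
    ring
  -- the first dict's keys are the distinct characters
  have hKeys : F.keys = PySem.Set.ofList l := by
    rw [hF, keys_firstFold, PySem.Dict.keys_empty, PySem.Set.update_nil_left]
  -- the first dict's value at a character of l is str.find's first index
  have hFval : ∀ ch ∈ l, F.getD ch 0 = PySem.Chars.find l [ch] := by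
    intro ch hch
    obtain ⟨k, hk⟩ := Option.isSome_iff_exists.mp ((PySem.List.index?_isSome_iff l ch).mpr hch)
    rw [PySem.Dict.getD_eq_get?_getD, hF, get?_firstFold, PySem.Dict.get?_empty, hk,
      find_singleton_of_index? l ch k hk]
    simp
  rw [hKeys]
  dsimp only
  -- B's emission loop, block by block
  rw [PySem.List.foldl_congr_mem (PySem.List.sorted (PySem.Set.ofList l) (fun c => c) false)
      (fun acc ch => acc ++ List.replicate (C.getD ch 0).toNat (F.getD ch 0))
      (fun acc ch => acc ++ List.replicate (l.count ch) (PySem.Chars.find l [ch])) []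
      (by
        intro acc ch hch
        have hchl : ch ∈ l := (PySem.Set.mem_ofList l ch).mp
          ((PySem.List.mem_sorted _ _ _ ch).mp hch)
        dsimp only
        rw [hFval ch hchl, hCcount ch]
        simp)]
  rw [PySem.List.foldl_append_eq_flatMap, PySem.List.foldl_append_eq_flatMap,
    List.nil_append, List.nil_append, sorted_eq_flatMap l, List.flatMap_assoc]
  apply List.flatMap_congr
  intro c _
  induction l.count c with
  | zero => simp
  | succ n ihn => simp [List.replicate_succ, ihn]
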